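-- pv_equiv track=rewrite | github.com/squillero/computer-sciences | Python/src/2023-24/20231124 longest-seq.py | find_max_seq
-- ===== SOURCE A (Python) =====
-- def sequence_length(sequence, start):
--     """Returns the lenght of the sequence of identical elements starting at `start`"""
--     length = 0
--     while (
--         start + length < len(sequence)
--         and sequence[start + length] == sequence[start]
--     ):
--         length += 1
--     return length
--
-- def find_max_seq(sequence):
--     """Returns length and starting point(s) of all longest sequences"""
--     max_ = 0
--     brackets = set()
--     for i in range(len(sequence)):
--         if sequence_length(sequence, i) > max_:
--             max_ = sequence_length(sequence, i)
--             brackets = {i}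
--         elif sequence_length(sequence, i) == max_:
--             brackets.add(i)
--     return max_, brackets
-- ===== SOURCE B (Python) =====
-- def find_max_seq(sequence):
--     """Returns length and starting point(s) of all longest sequences"""
--     n = len(sequence)
--     max_ = 0
--     starts = []
--     i = 0
--     while i < n:
--         v = sequence[i]
--         j = i + 1
--         while j < n and sequence[j] == v:
--             j += 1
--         run = j - i
--         if run > max_:
--             max_ = run
--             starts = [i]
--         elif run == max_:
--             starts.append(i)
--         i = j
--     return max_, set(starts)
-- ===== Notes on version B (the rewrite author's own statement) =====
-- stated objective: faster
-- what changed: A recomputes the run length from every index (quadratic nested scans); B makes a single left-to-right pass over the maximal runs, jumping from run start to run start while tracking the max length and its start positions.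
import Mathlib
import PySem

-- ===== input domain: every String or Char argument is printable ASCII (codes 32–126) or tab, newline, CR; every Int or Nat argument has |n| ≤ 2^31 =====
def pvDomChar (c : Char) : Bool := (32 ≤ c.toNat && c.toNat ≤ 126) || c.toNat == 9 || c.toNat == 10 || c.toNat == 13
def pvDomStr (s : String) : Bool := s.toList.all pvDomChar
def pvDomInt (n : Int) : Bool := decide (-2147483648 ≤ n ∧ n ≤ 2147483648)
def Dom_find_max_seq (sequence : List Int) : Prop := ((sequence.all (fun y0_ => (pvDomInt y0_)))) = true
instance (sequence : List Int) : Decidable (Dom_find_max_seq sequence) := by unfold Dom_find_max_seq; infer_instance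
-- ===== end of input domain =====

-- B replaces A's quadratic rescan-from-every-index with a single pass over the maximal runs (asymptotically faster in a timing run).

-- ===== PORT A =====
-- the 'while' loop of sequence_length, fuel-bounded (fuel = len+1 is enough for every call A makes)
def seqGo (s : List Int) (start : Int) : Int → Nat → Int
  | length, 0 => length
  | length, f + 1 =>
    if start + length < (s.length : Int) ∧
        PySem.List.pyGet? s (start + length) = PySem.List.pyGet? s start
    then seqGo s start (length + 1) f
    else length

def sequence_length (sequence : List Int) (start : Int) : Int :=
  seqGo sequence start 0 (sequence.length + 1)

def find_max_seq (sequence : List Int) : Int × List Int :=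
  (PySem.List.pyRange 0 sequence.length 1).foldl
    (fun st i =>
      if sequence_length sequence i > st.1 then (sequence_length sequence i, [i])
      else if sequence_length sequence i = st.1 then (st.1, PySem.Set.add st.2 i)
      else st)
    (0, PySem.Set.empty)

-- ===== PORT B =====
-- inner 'while j < n and sequence[j] == v', fuel-bounded (fuel = len is enough for every call B makes)
def scanRun (s : List Int) (v : Int) : Int → Nat → Int
  | j, 0 => j
  | j, f + 1 =>
    if j < (s.length : Int) ∧ PySem.List.pyGet? s j = some v
    then scanRun s v (j + 1) f
    else j

-- outer 'while i < n' loop of B, fuel-bounded (fuel = len+1 is enough: i strictly increases)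
def altGo (s : List Int) : Int → Int → List Int → Nat → Int × List Int
  | _, m, starts, 0 => (m, starts)
  | i, m, starts, f + 1 =>
    if i < (s.length : Int) then
      let v := (PySem.List.pyGet? s i).getD 0
      let j := scanRun s v (i + 1) s.length
      let run := j - i
      if run > m then altGo s j run [i] f
      else if run = m then altGo s j m (starts ++ [i]) f
      else altGo s j m starts f
    else (m, starts)

def find_max_seq_alt (sequence : List Int) : Int × List Int :=
  let p := altGo sequence 0 0 [] (sequence.length + 1)
  (p.1, PySem.Set.ofList p.2)

-- ===== PRECONDITION & SPEC =====
def Spec_find_max_seq (sequence : List Int) (out : Int × List Int) : Prop := out = find_max_seq_alt sequence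
instance (sequence : List Int) (out : Int × List Int) : Decidable (Spec_find_max_seq sequence out) := by unfold Spec_find_max_seq; infer_instance

-- ===== CLAIM (what is proved, stated in full; the proofs are below) =====
def Claim_equal_find_max_seq : Prop := ∀ (sequence : List Int), Dom_find_max_seq sequence → Spec_find_max_seq sequence (find_max_seq sequence)

-- ===== LEMMAS AND PROOFS =====

-- length of the run of elements equal to v starting at position j (reference function for both loops)
def refRun (s : List Int) (v : Int) (j : Nat) : Nat :=
  ((s.drop j).takeWhile (fun x => decide (x = v))).length

theorem refRun_le (s : List Int) (v : Int) (j : Nat) : refRun s v j ≤ s.length - j := by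
  calc ((s.drop j).takeWhile (fun x => decide (x = v))).length ≤ (s.drop j).length :=
        (List.takeWhile_sublist _).length_le
    _ = s.length - j := by simp

theorem refRun_pos (s : List Int) (v : Int) (j : Nat) (h : j < s.length) (hv : s[j] = v) :
    refRun s v j = refRun s v (j + 1) + 1 := by
  unfold refRun
  rw [List.drop_eq_getElem_cons h, List.takeWhile_cons]
  simp [hv]

theorem refRun_zero_of (s : List Int) (v : Int) (j : Nat) (h : ¬ (j < s.length ∧ s[j]? = some v)) :
    refRun s v j = 0 := by
  unfold refRun
  by_cases hj : j < s.length
  · have hv : s[j] ≠ v := by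
      intro hv; exact h ⟨hj, by simp [List.getElem?_eq_getElem hj, hv]⟩
    rw [List.drop_eq_getElem_cons hj, List.takeWhile_cons]
    simp [hv]
  · rw [List.drop_eq_nil_of_le (by omega)]; simp

theorem refRun_pos_inv (s : List Int) (v : Int) (j : Nat) (h : 0 < refRun s v j) :
    j < s.length ∧ s[j]? = some v := by
  by_contra hc
  rw [refRun_zero_of s v j hc] at h
  omega

theorem scanRun_eq (s : List Int) (v : Int) :
    ∀ (f : Nat) (j : Nat), refRun s v j < f →
      scanRun s v (j : Int) f = ((j + refRun s v j : Nat) : Int) := by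
  intro f
  induction f with
  | zero => intro j h; omega
  | succ f ih =>
    intro j h
    rw [scanRun]
    by_cases hc : (j : Int) < (s.length : Int) ∧ PySem.List.pyGet? s (j : Int) = some v
    · rw [if_pos hc]
      obtain ⟨h1, h2⟩ := hc
      have hj : j < s.length := by exact_mod_cast h1
      have hv : s[j] = v := by
        rw [PySem.List.pyGet?_natCast, List.getElem?_eq_getElem hj] at h2
        exact Option.some.inj h2
      have hr := refRun_pos s v j hj hv
      have : ((j : Int) + 1) = ((j + 1 : Nat) : Int) := by push_cast; ring
      rw [this, ih (j + 1) (by omega)]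
      omega
    · rw [if_neg hc]
      have : refRun s v j = 0 := by
        apply refRun_zero_of
        intro ⟨h1, h2⟩
        exact hc ⟨by exact_mod_cast h1, by rw [PySem.List.pyGet?_natCast]; exact h2⟩
      omega

theorem seqGo_eq (s : List Int) (i : Nat) (hi : i < s.length) :
    ∀ (f : Nat) (c : Nat), refRun s s[i] (i + c) < f →
      seqGo s (i : Int) (c : Int) f = ((c + refRun s s[i] (i + c) : Nat) : Int) := by
  intro f
  induction f with
  | zero => intro c h; omega
  | succ f ih =>
    intro c h
    rw [seqGo]
    have hcast : (i : Int) + (c : Int) = ((i + c : Nat) : Int) := by push_cast; ring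
    have hpi : PySem.List.pyGet? s (i : Int) = some s[i] := by
      rw [PySem.List.pyGet?_natCast, List.getElem?_eq_getElem hi]
    by_cases hc : (i : Int) + (c : Int) < (s.length : Int) ∧
        PySem.List.pyGet? s ((i : Int) + (c : Int)) = PySem.List.pyGet? s (i : Int)
    · rw [if_pos hc]
      obtain ⟨h1, h2⟩ := hc
      have hj : i + c < s.length := by omega
      have hv : s[i + c] = s[i] := by
        rw [hcast, PySem.List.pyGet?_natCast, List.getElem?_eq_getElem hj, hpi] at h2
        exact Option.some.inj h2
      have hr := refRun_pos s s[i] (i + c) hj hv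
      have : (c : Int) + 1 = ((c + 1 : Nat) : Int) := by push_cast; ring
      rw [this, ih (c + 1) (by rw [show i + (c+1) = (i+c)+1 by ring]; omega)]
      rw [show i + (c+1) = (i+c)+1 by ring]
      omega
    · rw [if_neg hc]
      have : refRun s s[i] (i + c) = 0 := by
        apply refRun_zero_of
        intro ⟨h1, h2⟩
        refine hc ⟨by omega, ?_⟩
        rw [hcast, PySem.List.pyGet?_natCast, hpi]
        rw [List.getElem?_eq_getElem h1] at h2
        rw [List.getElem?_eq_getElem h1]
        exact h2
      omega

theorem sequence_length_eq (s : List Int) (i : Nat) (hi : i < s.length) :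
    sequence_length s (i : Int) = ((refRun s s[i] i : Nat) : Int) := by
  have h : refRun s s[i] (i + 0) < s.length + 1 := by
    have := refRun_le s s[i] (i + 0); omega
  have := seqGo_eq s i hi (s.length + 1) 0 h
  simpa [sequence_length] using this

theorem runInterior (s : List Int) (v : Int) (i : Nat) :
    ∀ k, k ≤ refRun s v i → refRun s v (i + k) = refRun s v i - k := by
  intro k
  induction k with
  | zero => intro _; simp
  | succ k ih =>
    intro hk
    have h1 : refRun s v (i + k) = refRun s v i - k := ih (by omega)
    have hpos : 0 < refRun s v (i + k) := by omega
    obtain ⟨hlt, hv⟩ := refRun_pos_inv s v (i + k) hpos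
    have hv' : s[i + k] = v := by
      rw [List.getElem?_eq_getElem hlt] at hv
      exact Option.some.inj hv
    have := refRun_pos s v (i + k) hlt hv'
    rw [show i + (k + 1) = (i + k) + 1 by ring]
    omega

theorem runInteriorVal (s : List Int) (v : Int) (i k : Nat) (hk : k < refRun s v i) :
    i + k < s.length ∧ s[i + k]? = some v := by
  have h := runInterior s v i k (by omega)
  exact refRun_pos_inv s v (i + k) (by omega)

-- the loop body of A's fold, named for the proofs
def stepA (s : List Int) (st : Int × List Int) (k : Int) : Int × List Int :=
  if sequence_length s k > st.1 then (sequence_length s k, [k])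
  else if sequence_length s k = st.1 then (st.1, PySem.Set.add st.2 k)
  else st

theorem find_max_seq_eq_foldl (s : List Int) :
    find_max_seq s = (PySem.List.pyRange 0 s.length 1).foldl (stepA s) (0, PySem.Set.empty) := rfl

theorem foldl_fixed_mem {α β : Type} (f : β → α → β) (l : List α) (st : β)
    (h : ∀ x ∈ l, f st x = st) : l.foldl f st = st := by
  induction l with
  | nil => rfl
  | cons x xs ih =>
    simp only [List.foldl_cons, h x (by simp)]
    exact ih (fun y hy => h y (by simp [hy]))

theorem stepA_fixed (s : List Int) (st : Int × List Int) (i r : Nat)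
    (hi : i < s.length) (hr : r = refRun s s[i] i) (hmax : (r : Int) ≤ st.1) :
    (PySem.List.pyRange ((i : Int) + 1) ((i + r : Nat) : Int) 1).foldl (stepA s) st = st := by
  apply foldl_fixed_mem
  intro x hx
  rw [PySem.List.mem_pyRange_one] at hx
  obtain ⟨hx1, hx2⟩ := hx
  set d : Nat := x.toNat with hd
  have hxd : x = (d : Int) := by omega
  have hik : i < d ∧ d < i + r := by omega
  have hkr : d - i < refRun s s[i] i := by omega
  obtain ⟨hdlt, hdv⟩ := runInteriorVal s s[i] i (d - i) hkr
  rw [show i + (d - i) = d by omega] at hdlt hdv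
  have hdv' : s[d] = s[i] := by
    rw [List.getElem?_eq_getElem hdlt] at hdv
    exact Option.some.inj hdv
  have hrd : refRun s s[i] d = refRun s s[i] i - (d - i) := by
    have := runInterior s s[i] i (d - i) (by omega)
    rwa [show i + (d - i) = d by omega] at this
  have hlen : sequence_length s x = ((refRun s s[i] d : Nat) : Int) := by
    rw [hxd, sequence_length_eq s d hdlt, hdv']
  have hlt : sequence_length s x < st.1 := by
    rw [hlen]
    have : refRun s s[i] d < r := by omega
    calc ((refRun s s[i] d : Nat) : Int) < (r : Int) := by exact_mod_cast this
      _ ≤ st.1 := hmax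
  unfold stepA
  rw [if_neg (by omega), if_neg (by omega)]

theorem main_loop (s : List Int) :
    ∀ (f : Nat) (i : Nat) (m : Int) (bs : List Int),
      i ≤ s.length → s.length - i < f →
      (∀ x ∈ bs, x < (i : Int)) → bs.Pairwise (· < ·) →
      (PySem.List.pyRange (i : Int) (s.length : Int) 1).foldl (stepA s) (m, bs)
          = altGo s (i : Int) m bs f
        ∧ ((PySem.List.pyRange (i : Int) (s.length : Int) 1).foldl (stepA s) (m, bs)).2.Pairwise (· < ·) := by
  intro f
  induction f with
  | zero => intro i m bs _ hf _ _; omega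
  | succ f ih =>
    intro i m bs hin hf hbs hpair
    by_cases hi : i < s.length
    · -- value and run at i
      set v : Int := s[i] with hv
      set r : Nat := refRun s v i with hrdef
      have hr0 : 0 < r := by
        rw [hrdef, refRun_pos s v i hi rfl]; omega
      have hre : i + r ≤ s.length := by
        have := refRun_le s v i; omega
      -- B side: unfold one iteration of altGo
      have hgetd : (PySem.List.pyGet? s (i : Int)).getD 0 = v := by
        rw [PySem.List.pyGet?_natCast, List.getElem?_eq_getElem hi]; rfl
      have hscan : scanRun s v ((i : Int) + 1) s.length = ((i + r : Nat) : Int) := by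
        have hcast : (i : Int) + 1 = ((i + 1 : Nat) : Int) := by push_cast; ring
        have hfuel : refRun s v (i + 1) < s.length := by
          have := refRun_le s v (i + 1); omega
        rw [hcast, scanRun_eq s v s.length (i + 1) hfuel]
        have : refRun s v i = refRun s v (i + 1) + 1 := refRun_pos s v i hi rfl
        congr 1
        omega
      have hrun : ((i + r : Nat) : Int) - (i : Int) = (r : Int) := by push_cast; ring
      have haltB : altGo s (i : Int) m bs (f + 1) =
          if (r : Int) > m then altGo s ((i + r : Nat) : Int) (r : Int) [(i : Int)] f
          else if (r : Int) = m then altGo s ((i + r : Nat) : Int) m (bs ++ [(i : Int)]) f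
          else altGo s ((i + r : Nat) : Int) m bs f := by
        rw [altGo]
        rw [if_pos (by exact_mod_cast hi)]
        simp only [hgetd, hscan, hrun]
      -- A side: split the range at the run boundary
      have hsplit : PySem.List.pyRange (i : Int) (s.length : Int) 1 =
          PySem.List.pyRange (i : Int) ((i + r : Nat) : Int) 1 ++
          PySem.List.pyRange ((i + r : Nat) : Int) (s.length : Int) 1 :=
        PySem.List.pyRange_one_append _ _ _ (by push_cast; omega) (by push_cast; omega)
      have hcons : PySem.List.pyRange (i : Int) ((i + r : Nat) : Int) 1 =
          (i : Int) :: PySem.List.pyRange ((i : Int) + 1) ((i + r : Nat) : Int) 1 :=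
        PySem.List.pyRange_one_cons (by push_cast; omega)
      have hstep : stepA s (m, bs) (i : Int) =
          if (r : Int) > m then ((r : Int), [(i : Int)])
          else if (r : Int) = m then (m, PySem.Set.add bs (i : Int))
          else (m, bs) := by
        unfold stepA
        rw [sequence_length_eq s i hi, ← hv, ← hrdef]
      -- the state after processing index i, in each of the three branches
      rw [hsplit, List.foldl_append, hcons, List.foldl_cons, hstep, haltB]
      have hIH : ∀ (m' : Int) (bs' : List Int), (∀ x ∈ bs', x < ((i + r : Nat) : Int)) →
          bs'.Pairwise (· < ·) → (r : Int) ≤ m' →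
          (PySem.List.pyRange ((i : Int) + 1) ((i + r : Nat) : Int) 1).foldl (stepA s) (m', bs') =
            (m', bs') ∧
          ((PySem.List.pyRange ((i + r : Nat) : Int) (s.length : Int) 1).foldl (stepA s) (m', bs')
              = altGo s ((i + r : Nat) : Int) m' bs' f
            ∧ ((PySem.List.pyRange ((i + r : Nat) : Int) (s.length : Int) 1).foldl (stepA s)
                (m', bs')).2.Pairwise (· < ·)) := by
        intro m' bs' h1 h2 h3
        refine ⟨stepA_fixed s (m', bs') i r hi (by rw [hrdef, hv]) h3, ih (i + r) m' bs' hre (by omega) h1 h2⟩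
      by_cases h1 : (r : Int) > m
      · rw [if_pos h1, if_pos h1]
        obtain ⟨hfix, hEq, hPair⟩ := hIH (r : Int) [(i : Int)]
          (by intro x hx; simp at hx; subst hx; push_cast; omega)
          (by simp) (le_refl _)
        rw [hfix]
        exact ⟨hEq, hPair⟩
      · rw [if_neg h1, if_neg h1]
        by_cases h2 : (r : Int) = m
        · rw [if_pos h2, if_pos h2]
          have hnotmem : (i : Int) ∉ bs := fun hmem => by
            have := hbs _ hmem; omega
          have hadd : PySem.Set.add bs (i : Int) = bs ++ [(i : Int)] := by
            simp [PySem.Set.add, PySem.Set.contains, hnotmem]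
          rw [hadd]
          obtain ⟨hfix, hEq, hPair⟩ := hIH m (bs ++ [(i : Int)])
            (by intro x hx
                rcases List.mem_append.mp hx with hx | hx
                · have := hbs _ hx; push_cast; omega
                · simp at hx; subst hx; push_cast; omega)
            (by rw [List.pairwise_append]
                exact ⟨hpair, by simp, by intro a ha b hb; simp at hb; subst hb; exact hbs _ ha⟩)
            (by omega)
          rw [hfix]
          exact ⟨hEq, hPair⟩
        · rw [if_neg h2, if_neg h2]
          obtain ⟨hfix, hEq, hPair⟩ := hIH m bs
            (by intro x hx; have := hbs _ hx; push_cast; omega) hpair (by omega)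
          rw [hfix]
          exact ⟨hEq, hPair⟩
    · -- i = length: the range is empty and the loop stops
      have hie : i = s.length := by omega
      rw [PySem.List.pyRange_one_eq_nil (by omega), altGo]
      rw [if_neg (by omega)]
      exact ⟨rfl, hpair⟩

-- ===== VERDICT (by name: the statement is the Claim_ definition above) =====
theorem find_max_seq_spec : Claim_equal_find_max_seq := by
  intro s _
  unfold Spec_find_max_seq
  obtain ⟨hEq, hPair⟩ := main_loop s (s.length + 1) 0 0 [] (by omega) (by omega) (by simp) (by simp)
  simp only [Nat.cast_zero] at hEq hPair
  rw [find_max_seq_eq_foldl, show PySem.Set.empty = ([] : List Int) from rfl, hEq]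
  have hnodup : (altGo s 0 0 [] (s.length + 1)).2.Nodup := by
    rw [← hEq]; exact hPair.nodup
  unfold find_max_seq_alt
  change altGo s 0 0 [] (s.length + 1) =
    ((altGo s 0 0 [] (s.length + 1)).1, PySem.Set.ofList (altGo s 0 0 [] (s.length + 1)).2)
  rw [PySem.Set.ofList_eq_self_of_nodup _ hnodup]
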